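-- pv_equiv track=rewrite | github.com/Marbeck-one/IPS_PARSER_2025 | IPS - AVANCE_OCT-NOV-DIC_2025/Versiones antiguas SIG/IPS_CONSOLIDADO_v5.0.0.py | is_fully_enclosed_by_parens
-- ===== SOURCE A (Python) =====
-- def is_fully_enclosed_by_parens(text):
--     if not text.startswith("(") or not text.endswith(")"): return False
--     balance = 0
--     for i, char in enumerate(text):
--         if char == '(': balance += 1
--         elif char == ')': balance -= 1
--         if balance == 0 and i < len(text) - 1: return False
--     return balance == 0
-- ===== SOURCE B (Python) =====
-- def is_fully_enclosed_by_parens(text):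
--     if not text.startswith("(") or not text.endswith(")"):
--         return False
--     stack = []
--     first_match = None
--     for i, ch in enumerate(text):
--         if ch == '(':
--             stack.append(i)
--         elif ch == ')':
--             if not stack:
--                 return False
--             if stack.pop() == 0:
--                 first_match = i
--     return not stack and first_match == len(text) - 1
-- ===== Notes on version B (the rewrite author's own statement) =====
-- stated objective: alternative
-- what changed: Replaces the depth-counter scan (balance never returning to zero before the end) by stack-based partner matching: push indices of '(', pop on ')', and accept iff every paren is matched and the partner of the '(' at index 0 is the last index.
import Mathlib
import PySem

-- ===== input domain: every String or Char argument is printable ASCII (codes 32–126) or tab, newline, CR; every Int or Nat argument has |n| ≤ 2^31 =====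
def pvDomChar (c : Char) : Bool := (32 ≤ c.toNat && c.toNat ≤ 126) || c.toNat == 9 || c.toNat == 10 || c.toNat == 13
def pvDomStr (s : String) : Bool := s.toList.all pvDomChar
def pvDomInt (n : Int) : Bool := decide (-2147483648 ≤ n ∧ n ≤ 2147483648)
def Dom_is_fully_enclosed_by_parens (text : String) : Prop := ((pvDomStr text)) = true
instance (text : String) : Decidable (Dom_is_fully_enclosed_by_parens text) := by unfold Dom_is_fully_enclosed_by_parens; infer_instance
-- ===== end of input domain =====

-- B is an alternative same-cost algorithm: stack-based partner matching (push '(' indices, pop on ')',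
-- accept iff all parens match and the partner of index 0 is the last index) instead of A's depth counter.

-- ===== PORT A =====
-- balance update: '(' → +1, ')' → -1, else unchanged (A's if/elif)
def pvDelta (c : Char) : Int := if c = '(' then 1 else if c = ')' then -1 else 0

-- A's enumerate loop; 'i < len(text) - 1' holds exactly when the current char is not the last, i.e. rest ≠ []
def pvLoopA : List Char → Int → Bool
  | [], bal => bal == 0
  | c :: rest, bal =>
      let b := bal + pvDelta c
      if b == 0 ∧ rest ≠ [] then false else pvLoopA rest b

def is_fully_enclosed_by_parens (text : String) : Bool :=
  if !(PySem.Str.startswith text "(") || !(PySem.Str.endswith text ")") then false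
  else pvLoopA text.toList 0

-- ===== PORT B =====
-- Source B's enumerate loop: stack of '(' indices, first_match records the partner of index 0
def pvLoopB (n : Nat) : List Char → Nat → List Nat → Option Nat → Bool
  | [], _, stack, m => stack.isEmpty && (m == some (n - 1))
  | c :: rest, i, stack, m =>
      if c = '(' then pvLoopB n rest (i + 1) (i :: stack) m
      else if c = ')' then
        match stack with
        | [] => false
        | j :: s => pvLoopB n rest (i + 1) s (if j = 0 then some i else m)
      else pvLoopB n rest (i + 1) stack m

def is_fully_enclosed_by_parens_alt (text : String) : Bool :=
  if !(PySem.Str.startswith text "(") || !(PySem.Str.endswith text ")") then false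
  else pvLoopB text.toList.length text.toList 0 [] none

-- ===== PRECONDITION & SPEC =====
def Spec_is_fully_enclosed_by_parens (text : String) (out : Bool) : Prop := out = is_fully_enclosed_by_parens_alt text
instance (text : String) (out : Bool) : Decidable (Spec_is_fully_enclosed_by_parens text out) := by unfold Spec_is_fully_enclosed_by_parens; infer_instance

-- ===== CLAIM (what is proved, stated in full; the proofs are below) =====
def Claim_equal_is_fully_enclosed_by_parens : Prop := ∀ (text : String), Dom_is_fully_enclosed_by_parens text → Spec_is_fully_enclosed_by_parens text (is_fully_enclosed_by_parens text)

-- ===== LEMMAS AND PROOFS =====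

-- once index 0 has been popped before the last position, B's loop can only return false:
-- all further pushed indices are ≥ 1, so first_match never changes and never equals n-1
theorem pvLoopB_dead (n : Nat) (cs : List Char) : ∀ (stack : List Nat) (i : Nat) (m : Option Nat),
    (∀ x ∈ stack, x ≠ 0) → 1 ≤ i → m ≠ some (n - 1) →
    pvLoopB n cs i stack m = false := by
  induction cs with
  | nil =>
      intro stack i m _ _ hm
      simp only [pvLoopB, Bool.and_eq_false_iff]
      right
      simpa using hm
  | cons c rest ih =>
      intro stack i m hs hi hm
      by_cases h1 : c = '('
      · simp only [pvLoopB, if_pos h1]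
        exact ih (i :: stack) (i + 1) m
          (by intro x hx
              rcases List.mem_cons.mp hx with h | h
              · omega
              · exact hs x h) (by omega) hm
      · by_cases h2 : c = ')'
        · cases stack with
          | nil => simp [pvLoopB, h2]
          | cons j s =>
              have hj : j ≠ 0 := hs j (List.mem_cons_self ..)
              simp only [pvLoopB, if_neg h1, if_pos h2, if_neg hj]
              exact ih s (i + 1) m (fun x hx => hs x (List.mem_cons_of_mem _ hx)) (by omega) hm
        · simp only [pvLoopB, if_neg h1, if_neg h2]
          exact ih stack (i + 1) m hs (by omega) hm

-- main invariant: after the initial '(' (index 0 at the stack bottom, first_match still none),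
-- A's counter loop and B's stack loop agree; the counter equals the stack height
theorem pvLoop_equiv (n : Nat) (cs : List Char) : ∀ (s : List Nat) (i : Nat),
    1 ≤ i → i + cs.length = n → (∀ x ∈ s, x ≠ 0) →
    pvLoopA cs ((s.length : Int) + 1) = pvLoopB n cs i (s ++ [0]) none := by
  induction cs with
  | nil =>
      intro s i _ _ _
      have h : ¬ ((s.length : Int) + 1 = 0) := by positivity
      simp [pvLoopA, pvLoopB, h]
  | cons c rest ih =>
      intro s i hi hn hs
      simp only [pvLoopA, pvLoopB]
      by_cases hc1 : c = '('
      · have hd : pvDelta c = 1 := by simp [pvDelta, hc1]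
        rw [if_pos hc1, hd]
        rw [if_neg (by rintro ⟨h, _⟩; simp only [beq_iff_eq] at h; omega)]
        have := ih (i :: s) (i + 1) (by omega) (by simp at hn ⊢; omega)
          (by intro x hx
              rcases List.mem_cons.mp hx with h | h
              · omega
              · exact hs x h)
        simpa [List.cons_append] using this
      · rw [if_neg hc1]
        by_cases hc2 : c = ')'
        · rw [if_pos hc2]
          have hd : pvDelta c = -1 := by simp [pvDelta, hc2]
          rw [hd]
          cases s with
          | nil =>
              -- balance returns to 0: the '(' at index 0 is popped, partner recorded at i
              simp only [List.nil_append, List.length_nil]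
              cases rest with
              | nil =>
                  have hi' : i = n - 1 := by simp at hn; omega
                  simp [pvLoopA, pvLoopB, hi']
              | cons d ds =>
                  rw [if_pos (by refine ⟨by simp, by simp⟩)]
                  simp only [if_true]
                  rw [pvLoopB_dead n (d :: ds) [] (i + 1) (some i) (by simp) (by omega)
                    (by simp at hn ⊢; omega)]
          | cons j s' =>
              have hj : j ≠ 0 := hs j (List.mem_cons_self ..)
              simp only [List.cons_append]
              rw [if_neg hj]
              rw [if_neg (by rintro ⟨h, _⟩; simp at h; omega)]
              have := ih s' (i + 1) (by omega) (by simp at hn ⊢; omega)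
                (fun x hx => hs x (List.mem_cons_of_mem _ hx))
              have harith : ((j :: s').length : Int) + 1 + -1 = (s'.length : Int) + 1 := by
                simp
              rw [harith, this]
        · rw [if_neg hc2]
          have hd : pvDelta c = 0 := by simp [pvDelta, hc1, hc2]
          rw [hd]
          rw [if_neg (by rintro ⟨h, _⟩; simp only [beq_iff_eq] at h; omega)]
          have := ih s (i + 1) (by omega) (by simp at hn ⊢; omega) hs
          simpa using this

-- ===== VERDICT (by name: the statement is the Claim_ definition above) =====
theorem is_fully_enclosed_by_parens_spec : Claim_equal_is_fully_enclosed_by_parens := by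
  intro text _
  unfold Spec_is_fully_enclosed_by_parens is_fully_enclosed_by_parens is_fully_enclosed_by_parens_alt
  by_cases hs : PySem.Str.startswith text "(" = true
  · by_cases he : PySem.Str.endswith text ")" = true
    · rw [hs, he]
      simp only [Bool.not_true, Bool.or_self, if_neg (by simp : ¬ (false = true))]
      -- the guard guarantees the first character is '('
      have hpre : ['('] <+: text.toList := by
        have := (PySem.Chars.startswith_iff (s := text.toList) (p := "(".toList)).mp
          (by simpa using hs)
        simpa using this
      obtain ⟨rest, hrest⟩ := hpre
      rw [← hrest]
      simp only [List.singleton_append, pvLoopA, pvLoopB, pvDelta, if_true]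
      rw [if_neg (by rintro ⟨h, _⟩; norm_num at h)]
      have h0 : (0 : Int) + (1 : Int) = ((List.length ([] : List Nat) : Int) + 1) := by simp
      rw [h0, pvLoop_equiv (('(' :: rest).length) rest [] 1 (by omega) (by simp; omega) (by simp)]
      rfl
    · rw [hs]
      rw [Bool.not_eq_true] at he
      rw [he]
      simp
  · rw [Bool.not_eq_true] at hs
    rw [hs]
    simp
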